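-- pv_equiv track=rewrite | github.com/martikecskemeti/battleship | bs/battleship-FINAL.py | checkDrawMap
-- ===== SOURCE A (Python) =====
-- def checkDrawMap(drawMap,player):
--     result = 0
--     for i in range(0,len(drawMap[player])):
--         for n in range(0,len(drawMap[player][i])):
--             result += str(drawMap[player][i][n]).count("5")
--             result += str(drawMap[player][i][n]).count("4")
--             result += str(drawMap[player][i][n]).count("3")
--             result += str(drawMap[player][i][n]).count("2")
--
--     if result == 17:
--         return True
--     else:
--         return False
-- ===== SOURCE B (Python) =====
-- def checkDrawMap(drawMap, player):
--     total = 0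
--     for row in drawMap[player]:
--         for cell in row:
--             m = abs(cell)
--             while m:
--                 m, d = divmod(m, 10)
--                 if 2 <= d <= 5:
--                     total += 1
--     return total == 17
-- ===== Notes on version B (the rewrite author's own statement) =====
-- stated objective: alternative
-- what changed: B never builds strings: it extracts each cell's decimal digits arithmetically with divmod(abs(cell),10) in a while loop and tests 2<=d<=5, instead of A's stringify-and-substring-count of '5','4','3','2' per cell.
import Mathlib
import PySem

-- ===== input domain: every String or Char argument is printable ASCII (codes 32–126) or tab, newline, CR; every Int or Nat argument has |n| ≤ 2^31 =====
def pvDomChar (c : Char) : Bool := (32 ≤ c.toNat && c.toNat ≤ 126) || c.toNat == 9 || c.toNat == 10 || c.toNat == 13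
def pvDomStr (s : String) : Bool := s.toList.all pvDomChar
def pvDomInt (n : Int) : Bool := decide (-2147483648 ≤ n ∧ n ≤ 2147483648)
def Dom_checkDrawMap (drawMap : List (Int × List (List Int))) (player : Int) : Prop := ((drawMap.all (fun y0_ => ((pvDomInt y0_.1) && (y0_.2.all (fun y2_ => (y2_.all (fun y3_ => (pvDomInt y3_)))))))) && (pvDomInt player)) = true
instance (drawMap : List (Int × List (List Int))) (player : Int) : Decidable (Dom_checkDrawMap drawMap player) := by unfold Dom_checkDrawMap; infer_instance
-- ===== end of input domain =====

-- B replaces A's per-cell stringify + four substring counts by pure arithmetic digit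
-- extraction (divmod by 10 on abs(cell), test 2 <= d <= 5) — no strings at all (alternative).

-- ===== PORT A =====
def checkDrawMap (drawMap : List (Int × List (List Int))) (player : Int) : Bool :=
  match (PySem.Dict.mk drawMap).get? player with
  | none => false  -- Python raises KeyError here; excluded by Pre_
  | some grid =>
    let result : Int :=
      (PySem.List.pyRange 0 (PySem.List.len grid)).foldl (fun result i =>
        let row := PySem.List.pyGetD grid i []
        (PySem.List.pyRange 0 (PySem.List.len row)).foldl (fun result n =>
          let cell := PySem.List.pyGetD row n 0
          result + (PySem.Str.count (PySem.Int.toStr cell) "5" : Int)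
                 + (PySem.Str.count (PySem.Int.toStr cell) "4" : Int)
                 + (PySem.Str.count (PySem.Int.toStr cell) "3" : Int)
                 + (PySem.Str.count (PySem.Int.toStr cell) "2" : Int)) result) 0
    result == 17

-- ===== PORT B =====
-- B's 'while m: m, d = divmod(m, 10); if 2 <= d <= 5: total += 1' as structural
-- recursion on the Nat m (exact: m = abs(cell) ≥ 0, and divmod on Nat = Python divmod).
def shipDigits (m : Nat) : Nat :=
  if h : m = 0 then 0
  else (if 2 ≤ m % 10 ∧ m % 10 ≤ 5 then 1 else 0) + shipDigits (m / 10)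
decreasing_by exact Nat.div_lt_self (Nat.pos_of_ne_zero h) (by norm_num)

def checkDrawMap_alt (drawMap : List (Int × List (List Int))) (player : Int) : Bool :=
  match (PySem.Dict.mk drawMap).get? player with
  | none => false  -- KeyError in Python B as well; excluded by Pre_
  | some grid =>
    let total : Int :=
      grid.foldl (fun total row =>
        row.foldl (fun total cell => total + (shipDigits cell.natAbs : Int)) total) 0
    total == 17

-- ===== PRECONDITION & SPEC =====
-- Pre_ excludes exactly the inputs where Python A raises KeyError: player not a key of drawMap.
def Pre_checkDrawMap (drawMap : List (Int × List (List Int))) (player : Int) : Prop :=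
  ((PySem.Dict.mk drawMap).get? player).isSome = true
instance (drawMap : List (Int × List (List Int))) (player : Int) : Decidable (Pre_checkDrawMap drawMap player) := by unfold Pre_checkDrawMap; infer_instance
def pvWitness_checkDrawMap : (List (Int × List (List Int))) × Int := ([(0, [[5, 2], [13]])], 0)

def Spec_checkDrawMap (drawMap : List (Int × List (List Int))) (player : Int) (out : Bool) : Prop := out = checkDrawMap_alt drawMap player
instance (drawMap : List (Int × List (List Int))) (player : Int) (out : Bool) : Decidable (Spec_checkDrawMap drawMap player out) := by unfold Spec_checkDrawMap; infer_instance

-- ===== CLAIM (what is proved, stated in full; the proofs are below) =====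
def Claim_equal_checkDrawMap : Prop := ∀ (drawMap : List (Int × List (List Int))) (player : Int), Dom_checkDrawMap drawMap player → Pre_checkDrawMap drawMap player → Spec_checkDrawMap drawMap player (checkDrawMap drawMap player)

-- ===== LEMMAS AND PROOFS =====

-- sum of the four ship-digit char counts in a char list
def shipCount (l : List Char) : Nat :=
  l.count '5' + l.count '4' + l.count '3' + l.count '2'

lemma shipCount_cons (c : Char) (l : List Char) :
    shipCount (c :: l) = shipCount l + (if c = '2' ∨ c = '3' ∨ c = '4' ∨ c = '5' then 1 else 0) := by
  simp only [shipCount, List.count_cons]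
  by_cases h2 : c = '2' <;> by_cases h3 : c = '3' <;> by_cases h4 : c = '4' <;>
    by_cases h5 : c = '5' <;> simp_all <;> omega

lemma digitChar_ship (k : Nat) (hk : k < 10) :
    (Nat.digitChar k = '2' ∨ Nat.digitChar k = '3' ∨ Nat.digitChar k = '4' ∨ Nat.digitChar k = '5')
      ↔ (2 ≤ k ∧ k ≤ 5) := by
  interval_cases k <;> simp [Nat.digitChar]

lemma shipDigits_eq (n : Nat) :
    shipDigits n = (if 2 ≤ n % 10 ∧ n % 10 ≤ 5 then 1 else 0) + shipDigits (n / 10) := by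
  by_cases h0 : n = 0
  · subst h0
    rw [shipDigits]
    norm_num
  · rw [shipDigits, dif_neg h0]

-- core invariant: toDigitsCore prepends exactly n's decimal digits
lemma shipCount_toDigitsCore (fuel : Nat) : ∀ (n : Nat) (acc : List Char), n < fuel →
    shipCount (Nat.toDigitsCore 10 fuel n acc)
      = ((if 2 ≤ n % 10 ∧ n % 10 ≤ 5 then 1 else 0) + shipDigits (n / 10)) + shipCount acc := by
  induction fuel with
  | zero => intro n acc h; omega
  | succ f ih =>
    intro n acc h
    rw [Nat.toDigitsCore]
    by_cases h0 : n / 10 = 0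
    · rw [if_pos h0, shipCount_cons, h0]
      have hz : shipDigits 0 = 0 := by rw [shipDigits]; simp
      have hlt : n % 10 < 10 := Nat.mod_lt _ (by norm_num)
      by_cases hs : 2 ≤ n % 10 ∧ n % 10 ≤ 5
      · rw [if_pos ((digitChar_ship _ hlt).mpr hs), if_pos hs]; omega
      · rw [if_neg (fun hc => hs ((digitChar_ship _ hlt).mp hc)), if_neg hs]; omega
    · rw [if_neg h0]
      have hn : n / 10 < f := by
        have h1 : n / 10 < n := Nat.div_lt_self (by omega) (by norm_num)
        omega
      rw [ih (n / 10) _ hn, shipCount_cons]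
      have hlt : n % 10 < 10 := Nat.mod_lt _ (by norm_num)
      have hrec := shipDigits_eq (n / 10)
      by_cases hs : 2 ≤ n % 10 ∧ n % 10 ≤ 5
      · rw [if_pos ((digitChar_ship _ hlt).mpr hs), if_pos hs]; omega
      · rw [if_neg (fun hc => hs ((digitChar_ship _ hlt).mp hc)), if_neg hs]; omega

lemma shipCount_toDigits (n : Nat) :
    shipCount (Nat.toDigits 10 n) = shipDigits n := by
  rw [Nat.toDigits, shipCount_toDigitsCore (n + 1) n [] (by omega)]
  conv_rhs => rw [shipDigits_eq n]
  simp [shipCount]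

-- Chars.count with a single-character pattern is List.count.
lemma count_go_singleton (c : Char) (l : List Char) (fuel acc : Nat) (h : l.length ≤ fuel) :
    PySem.Chars.count.go [c] fuel l acc = acc + l.count c := by
  induction l generalizing fuel acc with
  | nil => cases fuel <;> simp [PySem.Chars.count.go]
  | cons a t ih =>
    cases fuel with
    | zero => simp at h
    | succ f =>
      simp only [PySem.Chars.count.go, List.isPrefixOf,
        Bool.and_true, List.length_cons]
      simp only [List.length_cons, Nat.succ_le_succ_iff] at h
      by_cases hc : c = a
      · subst hc
        simp [ih f (acc + 1) h]
        omega
      · have : (c == a) = false := by simp [hc]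
        simp [this, ih f acc h, Ne.symm hc]

lemma count_singleton (s : List Char) (c : Char) :
    PySem.Chars.count s [c] = s.count c := by
  simp [PySem.Chars.count, count_go_singleton c s s.length 0 (le_refl _)]

lemma str_count_singleton (n : Int) (c : Char) (s : String) (hs : s.toList = [c]) :
    PySem.Str.count (PySem.Int.toStr n) s = (PySem.Int.toChars n).count c := by
  rw [PySem.Str.count_eq, PySem.Int.toList_toStr, hs, count_singleton]

-- per cell: A's four substring counts = B's arithmetic digit count
lemma cell_eq (n : Int) :
    (PySem.Str.count (PySem.Int.toStr n) "5" : Int)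
      + (PySem.Str.count (PySem.Int.toStr n) "4" : Int)
      + (PySem.Str.count (PySem.Int.toStr n) "3" : Int)
      + (PySem.Str.count (PySem.Int.toStr n) "2" : Int)
      = (shipDigits n.natAbs : Int) := by
  rw [str_count_singleton n '5' "5" (by decide), str_count_singleton n '4' "4" (by decide),
      str_count_singleton n '3' "3" (by decide), str_count_singleton n '2' "2" (by decide)]
  have key : (PySem.Int.toChars n).count '5' + (PySem.Int.toChars n).count '4'
      + (PySem.Int.toChars n).count '3' + (PySem.Int.toChars n).count '2'
      = shipDigits n.natAbs := by
    rw [PySem.Int.toChars]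
    by_cases hn : n < 0
    · rw [if_pos hn]
      have := shipCount_toDigits n.natAbs
      simp only [shipCount] at this
      simp
      omega
    · rw [if_neg hn]
      have hna : n.toNat = n.natAbs := by omega
      have := shipCount_toDigits n.natAbs
      simp only [shipCount] at this
      rw [hna]; omega
  push_cast [← key]; ring

-- ===== VERDICT (by name: the statement is the Claim_ definition above) =====
theorem checkDrawMap_spec : Claim_equal_checkDrawMap := by
  intro drawMap player _ hpre
  unfold Pre_checkDrawMap at hpre
  unfold Spec_checkDrawMap checkDrawMap checkDrawMap_alt
  cases h : (PySem.Dict.mk drawMap).get? player with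
  | none => rw [h] at hpre
  | some grid =>
    simp only []
    -- A's index loops become structural folds
    rw [PySem.List.foldl_pyRange_zero_pyGetD grid []
      (fun res row => (PySem.List.pyRange 0 (PySem.List.len row)).foldl
        (fun res n => let cell := PySem.List.pyGetD row n 0
          res + (PySem.Str.count (PySem.Int.toStr cell) "5" : Int)
              + (PySem.Str.count (PySem.Int.toStr cell) "4" : Int)
              + (PySem.Str.count (PySem.Int.toStr cell) "3" : Int)
              + (PySem.Str.count (PySem.Int.toStr cell) "2" : Int)) res) 0]
    rw [PySem.List.foldl_congr_mem grid _
      (fun res row => row.foldl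
        (fun res cell => res + (shipDigits cell.natAbs : Int)) res) 0
      (fun res row _ => by
        rw [PySem.List.foldl_pyRange_zero_pyGetD row 0
          (fun res cell =>
            res + (PySem.Str.count (PySem.Int.toStr cell) "5" : Int)
                + (PySem.Str.count (PySem.Int.toStr cell) "4" : Int)
                + (PySem.Str.count (PySem.Int.toStr cell) "3" : Int)
                + (PySem.Str.count (PySem.Int.toStr cell) "2" : Int)) res]
        exact PySem.List.foldl_congr_mem row _ _ res
          (fun acc cell _ => by rw [← cell_eq cell]; ring))]
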